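-- pv_equiv track=rewrite | github.com/ArtemioUrbina/240pTestSuite | 240psuite/NES/tools/paginate_help.py | ca65_escape_bytes
-- ===== SOURCE A (Python) =====
-- def ca65_escape_bytes(blo):
--     """Encode an iterable of ints in 0-255, mostly ASCII, for ca65 .byte statement"""
--     runs = []
--     for c in blo:
--         if 32 <= c <= 126 and c != 34:
--             if runs and isinstance(runs[-1], bytearray):
--                 runs[-1].append(c)
--             else:
--                 runs.append(bytearray([c]))
--         else:
--             runs.append(c)
--     return ','.join('"%s"' % r.decode('ascii')
--                     if isinstance(r, bytearray)
--                     else '%d' % r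
--                     for r in runs)
-- ===== SOURCE B (Python) =====
-- def ca65_escape_bytes(blo):
--     """Encode an iterable of ints in 0-255, mostly ASCII, for ca65 .byte statement"""
--     blo = list(blo)
--     n = len(blo)
--     segs = []
--     i = 0
--     while i < n:
--         c = blo[i]
--         if 32 <= c <= 126 and c != 34:
--             j = i
--             while j < n and 32 <= blo[j] <= 126 and blo[j] != 34:
--                 j += 1
--             segs.append('"' + ''.join(map(chr, blo[i:j])) + '"')
--             i = j
--         else:
--             segs.append(str(c))
--             i += 1
--     return ','.join(segs)
-- ===== Notes on version B (the rewrite author's own statement) =====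
-- stated objective: alternative
-- what changed: B replaces A's heterogeneous runs list (bytearrays mutated in place, isinstance dispatch at render time) with a single forward scan that detects each maximal printable run by index and emits every segment string immediately.
import Mathlib
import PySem

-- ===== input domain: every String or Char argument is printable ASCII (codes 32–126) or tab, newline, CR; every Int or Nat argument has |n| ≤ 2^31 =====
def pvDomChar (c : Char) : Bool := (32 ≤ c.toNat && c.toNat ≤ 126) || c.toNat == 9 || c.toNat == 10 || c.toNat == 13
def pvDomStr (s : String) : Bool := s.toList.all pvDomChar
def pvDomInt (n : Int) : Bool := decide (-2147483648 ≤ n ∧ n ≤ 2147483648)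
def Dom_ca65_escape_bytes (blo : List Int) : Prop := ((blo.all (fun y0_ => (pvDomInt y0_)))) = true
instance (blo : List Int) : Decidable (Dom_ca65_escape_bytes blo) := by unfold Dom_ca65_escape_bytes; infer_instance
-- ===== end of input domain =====

-- B replaces A's heterogeneous runs list (bytearrays mutated in place, isinstance dispatch
-- at render time) with a single forward scan emitting each segment string immediately;
-- same cost, different decomposition (objective: alternative).

-- ===== PORT A =====
-- a "run" is either a bytearray (Sum.inl, list of byte values) or a bare int (Sum.inr)
def pvPrintable (c : Int) : Bool := (32 ≤ c && c ≤ 126) && c != 34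

def ca65A_step (runs : List (List Int ⊕ Int)) (c : Int) : List (List Int ⊕ Int) :=
  if pvPrintable c then
    match runs.getLast? with
    | some (Sum.inl bs) => runs.dropLast ++ [Sum.inl (bs ++ [c])]   -- runs[-1].append(c)
    | _ => runs ++ [Sum.inl [c]]
  else runs ++ [Sum.inr c]

def ca65A_render : (List Int ⊕ Int) → String
  | Sum.inl bs => "\"" ++ String.ofList (bs.map (fun b => Char.ofNat b.toNat)) ++ "\""
  | Sum.inr c => PySem.Int.toStr c

def ca65_escape_bytes (blo : List Int) : String :=
  String.intercalate "," ((blo.foldl ca65A_step []).map ca65A_render)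

-- ===== PORT B =====
-- B's outer while loop = recursion on the remaining suffix; the inner while that advances
-- j over the maximal printable run = takeWhile/dropWhile on that suffix.
def ca65B_segs : List Int → List String
  | [] => []
  | c :: rest =>
    if pvPrintable c then
      ("\"" ++ String.ofList ((c :: rest.takeWhile pvPrintable).map (fun b => Char.ofNat b.toNat)) ++ "\"")
        :: ca65B_segs (rest.dropWhile pvPrintable)
    else PySem.Int.toStr c :: ca65B_segs rest
termination_by l => l.length
decreasing_by
  · exact Nat.lt_succ_of_le (List.length_dropWhile_le _ _)
  · simp

def ca65_escape_bytes_alt (blo : List Int) : String :=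
  String.intercalate "," (ca65B_segs blo)

-- ===== PRECONDITION & SPEC =====
def Spec_ca65_escape_bytes (blo : List Int) (out : String) : Prop := out = ca65_escape_bytes_alt blo
instance (blo : List Int) (out : String) : Decidable (Spec_ca65_escape_bytes blo out) := by unfold Spec_ca65_escape_bytes; infer_instance

-- ===== CLAIM (what is proved, stated in full; the proofs are below) =====
def Claim_equal_ca65_escape_bytes : Prop := ∀ (blo : List Int), Dom_ca65_escape_bytes blo → Spec_ca65_escape_bytes blo (ca65_escape_bytes blo)

-- ===== LEMMAS AND PROOFS =====

-- the group structure A's fold builds, stated directly on the input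
def ca65Groups : List Int → List (List Int ⊕ Int)
  | [] => []
  | c :: rest =>
    if pvPrintable c then
      Sum.inl (c :: rest.takeWhile pvPrintable) :: ca65Groups (rest.dropWhile pvPrintable)
    else Sum.inr c :: ca65Groups rest
termination_by l => l.length
decreasing_by
  · exact Nat.lt_succ_of_le (List.length_dropWhile_le _ _)
  · simp

-- joint fold invariant: continuing A's fold after an open bytearray / after a bare int
theorem ca65A_fold_inv (blo : List Int) :
    (∀ (rs : List (List Int ⊕ Int)) (bs : List Int),
        blo.foldl ca65A_step (rs ++ [Sum.inl bs]) =
          rs ++ Sum.inl (bs ++ blo.takeWhile pvPrintable) :: ca65Groups (blo.dropWhile pvPrintable)) ∧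
    (∀ (rs : List (List Int ⊕ Int)) (c : Int),
        blo.foldl ca65A_step (rs ++ [Sum.inr c]) = rs ++ Sum.inr c :: ca65Groups blo) := by
  induction blo with
  | nil => simp [ca65Groups]
  | cons d rest ih =>
    obtain ⟨ih1, ih2⟩ := ih
    constructor
    · intro rs bs
      by_cases hd : pvPrintable d
      · have hstep : ca65A_step (rs ++ [Sum.inl bs]) d = rs ++ [Sum.inl (bs ++ [d])] := by
          simp [ca65A_step, hd]
        simp only [List.foldl_cons, hstep, ih1, List.takeWhile_cons, List.dropWhile_cons, hd]
        simp
      · have hstep : ca65A_step (rs ++ [Sum.inl bs]) d =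
            (rs ++ [Sum.inl bs]) ++ [Sum.inr d] := by
          simp [ca65A_step, hd]
        simp only [List.foldl_cons, hstep]
        rw [ih2]
        simp [ca65Groups, hd]
    · intro rs c
      by_cases hd : pvPrintable d
      · have hstep : ca65A_step (rs ++ [Sum.inr c]) d =
            (rs ++ [Sum.inr c]) ++ [Sum.inl [d]] := by
          simp [ca65A_step, hd]
        simp only [List.foldl_cons, hstep]
        rw [ih1]
        simp [ca65Groups, hd]
      · have hstep : ca65A_step (rs ++ [Sum.inr c]) d =
            (rs ++ [Sum.inr c]) ++ [Sum.inr d] := by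
          simp [ca65A_step, hd]
        simp only [List.foldl_cons, hstep]
        rw [ih2]
        simp [ca65Groups, hd]

theorem ca65A_fold_eq_groups (blo : List Int) :
    blo.foldl ca65A_step [] = ca65Groups blo := by
  cases blo with
  | nil => simp [ca65Groups]
  | cons c rest =>
    by_cases hc : pvPrintable c
    · have hstep : ca65A_step [] c = [] ++ [Sum.inl [c]] := by simp [ca65A_step, hc]
      simp only [List.foldl_cons, hstep, (ca65A_fold_inv rest).1]
      simp [ca65Groups, hc]
    · have hstep : ca65A_step [] c = [] ++ [Sum.inr c] := by simp [ca65A_step, hc]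
      simp only [List.foldl_cons, hstep, (ca65A_fold_inv rest).2]
      simp [ca65Groups, hc]

theorem ca65B_segs_eq_map_render (blo : List Int) :
    ca65B_segs blo = (ca65Groups blo).map ca65A_render := by
  induction blo using ca65B_segs.induct with
  | case1 => simp [ca65B_segs, ca65Groups]
  | case2 c rest hc ih =>
    rw [ca65B_segs, ca65Groups]
    simp [hc, ih, ca65A_render]
  | case3 c rest hc ih =>
    rw [ca65B_segs, ca65Groups]
    simp [hc, ih, ca65A_render]

-- ===== VERDICT (by name: the statement is the Claim_ definition above) =====
theorem ca65_escape_bytes_spec : Claim_equal_ca65_escape_bytes := by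
  intro blo _
  unfold Spec_ca65_escape_bytes ca65_escape_bytes ca65_escape_bytes_alt
  rw [ca65A_fold_eq_groups, ca65B_segs_eq_map_render]
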